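-- pv_equiv track=rewrite | github.com/dudefromearth/MarketSwarm | services/vexy_ai/tier_config.py | tier_from_roles
-- ===== SOURCE A (Python) =====
-- from typing import Dict, Any, List, Optional
--
-- def tier_from_roles(roles: Optional[List[str]]) -> str:
--     """
--     Determine tier from WordPress/auth roles.
--
--     Args:
--         roles: List of user roles
--
--     Returns:
--         Tier name
--     """
--     if not roles:
--         return "observer"
--
--     roles_lower = [r.lower() for r in roles]
--
--     # Check in priority order
--     if "administrator" in roles_lower or "admin" in roles_lower:
--         return "administrator"
--     if "coaching" in roles_lower or "fotw_coaching" in roles_lower: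
--         return "coaching"
--     if "navigator" in roles_lower or "fotw_navigator" in roles_lower:
--         return "navigator"
--     if "activator" in roles_lower or "fotw_activator" in roles_lower or "subscriber" in roles_lower:
--         return "activator"
--
--     return "observer"
-- ===== SOURCE B (Python) =====
-- # Rank-minimisation: each role maps to a numeric priority rank; the answer is the
-- # name at the minimum rank seen (4 = observer when nothing matches / no roles).
-- _TIER_RANK = {
--     "administrator": 0, "admin": 0,
--     "coaching": 1, "fotw_coaching": 1,
--     "navigator": 2, "fotw_navigator": 2,
--     "activator": 3, "fotw_activator": 3, "subscriber": 3,
-- }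
-- _TIER_NAMES = ("administrator", "coaching", "navigator", "activator", "observer")
--
-- def tier_from_roles(roles):
--     best = 4
--     for r in roles or ():
--         best = min(best, _TIER_RANK.get(r.lower(), 4))
--     return _TIER_NAMES[best]
-- ===== Notes on version B (the rewrite author's own statement) =====
-- stated objective: alternative
-- what changed: Replaces the four priority if-branches (each a membership test over the lowered role list) by a rank-minimisation: a dict maps every alias to a numeric rank, one fold takes the minimum rank over the roles, and the result indexes a names tuple.
import Mathlib
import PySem

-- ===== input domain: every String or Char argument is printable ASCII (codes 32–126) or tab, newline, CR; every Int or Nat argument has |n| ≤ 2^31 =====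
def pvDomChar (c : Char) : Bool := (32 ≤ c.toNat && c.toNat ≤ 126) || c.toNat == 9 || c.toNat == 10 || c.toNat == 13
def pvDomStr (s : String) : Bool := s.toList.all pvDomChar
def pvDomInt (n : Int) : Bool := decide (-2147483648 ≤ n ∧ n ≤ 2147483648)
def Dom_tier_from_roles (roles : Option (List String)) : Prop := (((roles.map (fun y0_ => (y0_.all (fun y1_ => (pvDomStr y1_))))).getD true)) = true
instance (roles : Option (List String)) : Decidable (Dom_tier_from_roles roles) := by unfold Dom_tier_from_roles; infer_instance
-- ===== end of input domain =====

-- B replaces A's priority if-branches by rank-minimisation: a dict maps every alias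
-- to a numeric rank, one fold takes the minimum rank, which indexes a names tuple
-- (objective: alternative algorithm, same cost).

-- ===== PORT A =====
def tier_from_roles (roles : Option (List String)) : String :=
  match roles with
  | none => "observer"
  | some rs =>
    if rs.isEmpty then "observer"
    else
      let rl := rs.map PySem.Str.lower
      if rl.contains "administrator" || rl.contains "admin" then "administrator"
      else if rl.contains "coaching" || rl.contains "fotw_coaching" then "coaching"
      else if rl.contains "navigator" || rl.contains "fotw_navigator" then "navigator"
      else if rl.contains "activator" || rl.contains "fotw_activator" || rl.contains "subscriber" then "activator"
      else "observer"

-- ===== PORT B =====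
-- _TIER_RANK: alias -> numeric priority rank
def tierRank : PySem.Dict String Int :=
  PySem.Dict.ofList
    [("administrator", 0), ("admin", 0),
     ("coaching", 1), ("fotw_coaching", 1),
     ("navigator", 2), ("fotw_navigator", 2),
     ("activator", 3), ("fotw_activator", 3), ("subscriber", 3)]

-- _TIER_NAMES
def tierNames : List String :=
  ["administrator", "coaching", "navigator", "activator", "observer"]

def tier_from_roles_alt (roles : Option (List String)) : String :=
  -- best = 4; for r in roles or (): best = min(best, RANK.get(r.lower(), 4))
  let best := (roles.getD []).foldl
    (fun b r => min b (PySem.Dict.getD tierRank (PySem.Str.lower r) 4)) 4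
  -- _TIER_NAMES[best]; best is always in 0..4 so the index is in range
  PySem.List.pyGetD tierNames best ""

-- ===== PRECONDITION & SPEC =====
def Spec_tier_from_roles (roles : Option (List String)) (out : String) : Prop := out = tier_from_roles_alt roles
instance (roles : Option (List String)) (out : String) : Decidable (Spec_tier_from_roles roles out) := by unfold Spec_tier_from_roles; infer_instance

-- ===== CLAIM (what is proved, stated in full; the proofs are below) =====
def Claim_equal_tier_from_roles : Prop := ∀ (roles : Option (List String)), Dom_tier_from_roles roles → Spec_tier_from_roles roles (tier_from_roles roles)

-- ===== LEMMAS AND PROOFS =====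

-- the minimum rank of a lowered role list, characterised by the contains flags A tests
def minRank (rl : List String) : Int :=
  if rl.contains "administrator" || rl.contains "admin" then 0
  else if rl.contains "coaching" || rl.contains "fotw_coaching" then 1
  else if rl.contains "navigator" || rl.contains "fotw_navigator" then 2
  else if rl.contains "activator" || rl.contains "fotw_activator" || rl.contains "subscriber" then 3
  else 4

theorem minRank_bounds (rl : List String) : 0 ≤ minRank rl ∧ minRank rl ≤ 4 := by
  unfold minRank; split_ifs <;> omega

theorem rank_default (r : String)
    (h1 : r ≠ "administrator") (h2 : r ≠ "admin") (h3 : r ≠ "coaching")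
    (h4 : r ≠ "fotw_coaching") (h5 : r ≠ "navigator") (h6 : r ≠ "fotw_navigator")
    (h7 : r ≠ "activator") (h8 : r ≠ "fotw_activator") (h9 : r ≠ "subscriber") :
    PySem.Dict.getD tierRank r 4 = 4 := by
  rw [show tierRank = PySem.Dict.mk
    [("administrator", 0), ("admin", 0), ("coaching", 1), ("fotw_coaching", 1),
     ("navigator", 2), ("fotw_navigator", 2), ("activator", 3), ("fotw_activator", 3),
     ("subscriber", 3)] from by decide]
  simp only [PySem.Dict.getD, PySem.Dict.get?_mk_cons, beq_iff_eq]
  split_ifs <;> simp_all [PySem.Dict.get?]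

theorem minRank_cons (r : String) (rl : List String) :
    min (PySem.Dict.getD tierRank r 4) (minRank rl) = minRank (r :: rl) := by
  by_cases h1 : r = "administrator"
  · subst h1
    rw [show PySem.Dict.getD tierRank "administrator" 4 = 0 from by decide]
    simp [minRank]
    split_ifs <;> omega
  by_cases h2 : r = "admin"
  · subst h2
    rw [show PySem.Dict.getD tierRank "admin" 4 = 0 from by decide]
    simp [minRank]
    split_ifs <;> omega
  by_cases h3 : r = "coaching"
  · subst h3
    rw [show PySem.Dict.getD tierRank "coaching" 4 = 1 from by decide]
    simp [minRank]
    split_ifs <;> omega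
  by_cases h4 : r = "fotw_coaching"
  · subst h4
    rw [show PySem.Dict.getD tierRank "fotw_coaching" 4 = 1 from by decide]
    simp [minRank]
    split_ifs <;> omega
  by_cases h5 : r = "navigator"
  · subst h5
    rw [show PySem.Dict.getD tierRank "navigator" 4 = 2 from by decide]
    simp [minRank]
    split_ifs <;> omega
  by_cases h6 : r = "fotw_navigator"
  · subst h6
    rw [show PySem.Dict.getD tierRank "fotw_navigator" 4 = 2 from by decide]
    simp [minRank]
    split_ifs <;> omega
  by_cases h7 : r = "activator"
  · subst h7
    rw [show PySem.Dict.getD tierRank "activator" 4 = 3 from by decide]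
    simp [minRank]
    split_ifs <;> omega
  by_cases h8 : r = "fotw_activator"
  · subst h8
    rw [show PySem.Dict.getD tierRank "fotw_activator" 4 = 3 from by decide]
    simp [minRank]
    split_ifs <;> omega
  by_cases h9 : r = "subscriber"
  · subst h9
    rw [show PySem.Dict.getD tierRank "subscriber" 4 = 3 from by decide]
    simp [minRank]
    split_ifs <;> omega
  rw [rank_default r h1 h2 h3 h4 h5 h6 h7 h8 h9]
  simp only [minRank, List.contains_cons,
    (show (("administrator" : String) == r) = false from beq_eq_false_iff_ne.mpr (Ne.symm h1)),
    (show (("admin" : String) == r) = false from beq_eq_false_iff_ne.mpr (Ne.symm h2)),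
    (show (("coaching" : String) == r) = false from beq_eq_false_iff_ne.mpr (Ne.symm h3)),
    (show (("fotw_coaching" : String) == r) = false from beq_eq_false_iff_ne.mpr (Ne.symm h4)),
    (show (("navigator" : String) == r) = false from beq_eq_false_iff_ne.mpr (Ne.symm h5)),
    (show (("fotw_navigator" : String) == r) = false from beq_eq_false_iff_ne.mpr (Ne.symm h6)),
    (show (("activator" : String) == r) = false from beq_eq_false_iff_ne.mpr (Ne.symm h7)),
    (show (("fotw_activator" : String) == r) = false from beq_eq_false_iff_ne.mpr (Ne.symm h8)),
    (show (("subscriber" : String) == r) = false from beq_eq_false_iff_ne.mpr (Ne.symm h9)),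
    Bool.false_or]
  split_ifs <;> omega

theorem foldl_minRank (rl : List String) : ∀ b : Int, b ≤ 4 →
    rl.foldl (fun b r => min b (tierRank.getD r 4)) b = min b (minRank rl) := by
  induction rl with
  | nil => intro b hb; simp [minRank]; omega
  | cons r rl ih =>
    intro b hb
    simp only [List.foldl_cons]
    rw [ih (min b (tierRank.getD r 4)) (by omega), min_assoc, minRank_cons]

-- ===== VERDICT (by name: the statement is the Claim_ definition above) =====
theorem tier_from_roles_spec : Claim_equal_tier_from_roles := by
  intro roles _
  unfold Spec_tier_from_roles
  match roles with
  | none => decide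
  | some rs =>
    by_cases h : rs.isEmpty
    · rw [List.isEmpty_iff.mp h]; decide
    · unfold tier_from_roles tier_from_roles_alt
      simp only [Option.getD_some, h, Bool.false_eq_true, if_false]
      rw [show List.foldl (fun (b : Int) (r : String) => min b (tierRank.getD (PySem.Str.lower r) 4)) 4 rs
            = List.foldl (fun b r => min b (tierRank.getD r 4)) 4 (rs.map PySem.Str.lower)
            from (List.foldl_map (f := PySem.Str.lower) (g := fun (b : Int) r => min b (tierRank.getD r 4)) (l := rs) (init := 4)).symm,
          foldl_minRank (rs.map PySem.Str.lower) 4 (le_refl 4)]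
      have hb := minRank_bounds (rs.map PySem.Str.lower)
      rw [show min 4 (minRank (rs.map PySem.Str.lower)) = minRank (rs.map PySem.Str.lower) from by omega]
      unfold minRank
      split_ifs <;> decide
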